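-- pv_equiv track=rewrite | github.com/klean2050/cvi-eye-tracking | main.py | integrate_subjects
-- ===== SOURCE A (Python) =====
-- def integrate_subjects(feats):
--     new_feats = {}
--     for subject in feats:
--         real_subject = subject.split("_")[0]
--         if real_subject not in new_feats:
--             new_feats[real_subject] = []
--         new_feats[real_subject].extend(feats[subject])
--     return new_feats
-- ===== SOURCE B (Python) =====
-- def integrate_subjects(feats):
--     # two-pass: collect distinct prefixes in first-seen order, then build each
--     # group by one scan per prefix (dict comprehension) instead of A's
--     # incremental dict mutation.
--     order = []
--     for subject in feats:
--         p = subject.split("_")[0]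
--         if p not in order:
--             order.append(p)
--     return {p: [x for s in feats if s.split("_")[0] == p for x in feats[s]]
--             for p in order}
-- ===== Notes on version B (the rewrite author's own statement) =====
-- stated objective: alternative
-- what changed: B replaces A's single pass of incremental dict mutation (setdefault-then-extend) by a two-phase plan: first collect the distinct subject prefixes in first-seen order, then build each group's concatenation with one comprehension scan per prefix.
import Mathlib
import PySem

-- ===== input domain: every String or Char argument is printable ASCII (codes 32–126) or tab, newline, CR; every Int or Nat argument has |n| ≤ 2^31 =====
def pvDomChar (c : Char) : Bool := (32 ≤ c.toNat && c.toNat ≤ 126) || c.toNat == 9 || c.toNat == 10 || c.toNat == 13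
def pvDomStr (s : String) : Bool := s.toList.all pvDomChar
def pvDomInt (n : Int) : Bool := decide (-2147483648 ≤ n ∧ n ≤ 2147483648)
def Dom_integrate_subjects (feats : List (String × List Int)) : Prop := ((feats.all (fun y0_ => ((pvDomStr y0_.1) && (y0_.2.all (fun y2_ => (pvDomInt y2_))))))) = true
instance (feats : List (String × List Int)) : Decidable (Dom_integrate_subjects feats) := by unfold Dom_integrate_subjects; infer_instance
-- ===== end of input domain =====

-- B changes only the decomposition (distinct prefixes first, then one scan per prefix); not faster.

-- ===== PORT A =====
-- subject.split("_")[0]: the separator "_" is non-empty so split? is `some`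
-- of a non-empty list; the [0] index is therefore total (headD never uses "").
def pvPfx (s : String) : String := ((PySem.Str.split? s "_").getD []).headD ""

-- feats[subject]: first-match lookup in the input dict (the key is always
-- present since `subject` ranges over feats' keys, so the [] default is unused).
def pvVal (feats : List (String × List Int)) (k : String) : List Int :=
  ((PySem.Dict.mk feats).get? k).getD []

def integrate_subjects (feats : List (String × List Int)) : List (String × List Int) :=
  (feats.foldl (fun d kv =>
      let r := pvPfx kv.1
      let d1 := if d.contains r then d else d.insert r ([] : List Int)
      d1.modify r [] (fun cur => cur ++ pvVal feats kv.1))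
    PySem.Dict.empty).items

-- ===== PORT B =====
def integrate_subjects_alt (feats : List (String × List Int)) : List (String × List Int) :=
  let order := feats.foldl (fun ord kv =>
      let p := pvPfx kv.1
      if ord.contains p then ord else ord ++ [p]) ([] : List String)
  order.map (fun p =>
    (p, feats.flatMap (fun kv => if pvPfx kv.1 == p then pvVal feats kv.1 else [])))

-- ===== PRECONDITION & SPEC =====
def Spec_integrate_subjects (feats : List (String × List Int)) (out : List (String × List Int)) : Prop := out = integrate_subjects_alt feats
instance (feats : List (String × List Int)) (out : List (String × List Int)) : Decidable (Spec_integrate_subjects feats out) := by unfold Spec_integrate_subjects; infer_instance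

-- ===== CLAIM (what is proved, stated in full; the proofs are below) =====
def Claim_equal_integrate_subjects : Prop := ∀ (feats : List (String × List Int)), Dom_integrate_subjects feats → Spec_integrate_subjects feats (integrate_subjects feats)

-- ===== LEMMAS AND PROOFS =====

-- A's loop body, abbreviated for the lemmas below
def pvStepA (feats : List (String × List Int)) (d : PySem.Dict String (List Int))
    (kv : String × List Int) : PySem.Dict String (List Int) :=
  let r := pvPfx kv.1
  let d1 := if d.contains r then d else d.insert r ([] : List Int)
  d1.modify r [] (fun cur => cur ++ pvVal feats kv.1)

theorem pvStepA_eq_setdefault (feats : List (String × List Int))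
    (d : PySem.Dict String (List Int)) (kv : String × List Int) :
    pvStepA feats d kv
      = (d.setdefault (pvPfx kv.1) []).modify (pvPfx kv.1) []
          (fun cur => cur ++ pvVal feats kv.1) := by
  rcases h : d.contains (pvPfx kv.1)
  · rw [PySem.Dict.setdefault_of_not_contains _ _ h]; simp [pvStepA, h]
  · rw [PySem.Dict.setdefault_of_contains _ _ h]; simp [pvStepA, h]

theorem pvGetD_stepA (feats : List (String × List Int))
    (d : PySem.Dict String (List Int)) (kv : String × List Int) (c : String) :
    (pvStepA feats d kv).getD c []
      = if c = pvPfx kv.1 then d.getD c [] ++ pvVal feats kv.1 else d.getD c [] := by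
  rw [pvStepA_eq_setdefault, PySem.Dict.getD_modify]
  by_cases hc : c = pvPfx kv.1
  · subst hc; rw [if_pos rfl, if_pos rfl, PySem.Dict.getD_setdefault_self]
  · rw [if_neg hc, if_neg hc, PySem.Dict.getD_eq_get?_getD,
      PySem.Dict.get?_setdefault_of_ne _ _ hc, ← PySem.Dict.getD_eq_get?_getD]

theorem pvKeys_stepA (feats : List (String × List Int))
    (d : PySem.Dict String (List Int)) (kv : String × List Int) :
    (pvStepA feats d kv).keys = PySem.Set.add d.keys (pvPfx kv.1) := by
  rw [pvStepA_eq_setdefault, PySem.Dict.keys_modify]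
  rw [PySem.Dict.keys_insert_of_contains]
  · rw [PySem.Dict.keys_setdefault, PySem.Set.add_eq_ite]
    by_cases h : pvPfx kv.1 ∈ d.keys
    · rw [if_pos ((PySem.Dict.contains_iff_mem_keys d _).mpr h), if_pos h]
    · rw [if_neg (by simpa using (fun hc => h ((PySem.Dict.contains_iff_mem_keys d _).mp hc))),
        if_neg h]
  · rw [PySem.Dict.contains_setdefault]; simp

theorem pvGetD_foldA (feats l : List (String × List Int))
    (d : PySem.Dict String (List Int)) (c : String) :
    (l.foldl (pvStepA feats) d).getD c []
      = d.getD c [] ++ l.flatMap (fun kv => if pvPfx kv.1 == c then pvVal feats kv.1 else []) := by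
  induction l generalizing d with
  | nil => simp
  | cons kv l ih =>
    rw [List.foldl_cons, ih, pvGetD_stepA, List.flatMap_cons]
    by_cases hc : c = pvPfx kv.1
    · rw [if_pos hc, if_pos (by simp [hc]), List.append_assoc]
    · rw [if_neg hc, if_neg (by simpa using fun h => hc h.symm), List.nil_append]

theorem pvKeys_foldA (feats l : List (String × List Int))
    (d : PySem.Dict String (List Int)) :
    (l.foldl (pvStepA feats) d).keys
      = PySem.Set.update d.keys (l.map (fun kv => pvPfx kv.1)) := by
  induction l generalizing d with
  | nil => simp [PySem.Set.update]
  | cons kv l ih =>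
    rw [List.foldl_cons, ih, List.map_cons, PySem.Set.update_cons, pvKeys_stepA]

theorem pvOrderB (l : List (String × List Int)) (s : List String) :
    l.foldl (fun ord kv =>
        if ord.contains (pvPfx kv.1) then ord else ord ++ [pvPfx kv.1]) s
      = PySem.Set.update s (l.map (fun kv => pvPfx kv.1)) := by
  induction l generalizing s with
  | nil => simp [PySem.Set.update]
  | cons kv l ih =>
    have hstep : (if s.contains (pvPfx kv.1) then s else s ++ [pvPfx kv.1])
        = PySem.Set.add s (pvPfx kv.1) := by
      rw [PySem.Set.add_eq_ite]
      by_cases h : pvPfx kv.1 ∈ s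
      · rw [if_pos (List.contains_iff_mem.mpr h), if_pos h]
      · rw [if_neg h, if_neg (by simpa using fun hc => h (List.contains_iff_mem.mp hc))]
    rw [List.foldl_cons, hstep, ih, List.map_cons, PySem.Set.update_cons]

-- ===== VERDICT (by name: the statement is the Claim_ definition above) =====
theorem integrate_subjects_spec : Claim_equal_integrate_subjects := by
  intro feats _
  unfold Spec_integrate_subjects
  simp only [integrate_subjects, integrate_subjects_alt]
  show (feats.foldl (pvStepA feats) PySem.Dict.empty).items = _
  have hkeys : (feats.foldl (pvStepA feats) PySem.Dict.empty).keys
      = PySem.Set.ofList (feats.map (fun kv => pvPfx kv.1)) := by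
    rw [pvKeys_foldA]
    simp [PySem.Dict.keys, PySem.Dict.empty, PySem.Set.update_nil_left]
  have hnd : (feats.foldl (pvStepA feats) PySem.Dict.empty).keys.Nodup := by
    rw [hkeys]; exact PySem.Set.nodup_ofList _
  rw [PySem.Dict.items_eq_map_keys _ hnd ([] : List Int), hkeys, pvOrderB,
    PySem.Set.update_nil_left]

  refine List.map_congr_left (fun p _ => ?_)
  rw [pvGetD_foldA]
  simp
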